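-- pv_equiv track=rewrite | github.com/vtsoi4seneca-ops/aig230-nlp-project-parliament-factcheck | src/build_gold_dataset.py | build_stats_rows
-- ===== SOURCE A (Python) =====
-- from collections import Counter, defaultdict
-- from typing import Dict, Iterable, List, Optional, Sequence, Tuple
--
-- def build_stats_rows(rows: Sequence[dict], stats: Counter) -> List[dict]:
--     output = [
--         {"category": "overall", "name": "total_rows", "value": str(len(rows))},
--         {"category": "overall", "name": "true_rows", "value": str(sum(row.get("label") == "True" for row in rows))},
--         {"category": "overall", "name": "false_rows", "value": str(sum(row.get("label") == "False" for row in rows))},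
--     ]
--
--     for category_name, values in [
--         ("claim_family", Counter(row.get("claim_family", "") for row in rows)),
--         ("claim_type", Counter(row.get("claim_type", "") for row in rows)),
--         ("rule_id", Counter(row.get("rule_id", "") for row in rows)),
--         ("gold_resolution_method", Counter(row.get("gold_resolution_method", "") for row in rows)),
--     ]:
--         for name, value in sorted(values.items()):
--             output.append({"category": category_name, "name": name, "value": str(value)})
--
--     for key, value in sorted(stats.items()):
--         category, _, metric = key.partition(".")
--         output.append({"category": category, "name": metric or key, "value": str(value)})
--
--     return output
-- ===== SOURCE B (Python) =====
-- def _cat_rows(name, counts):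
--     return [{"category": name, "name": k, "value": str(v)} for k, v in sorted(counts.items())]
--
--
-- def _stat_rows(stats):
--     out = []
--     for key, value in sorted(stats.items()):
--         category, _, metric = key.partition(".")
--         out.append({"category": category, "name": metric or key, "value": str(value)})
--     return out
--
--
-- def build_stats_rows(rows, stats):
--     total = true_rows = false_rows = 0
--     counters = {"claim_family": {}, "claim_type": {}, "rule_id": {}, "gold_resolution_method": {}}
--     for row in rows:
--         total += 1
--         label = row.get("label")
--         if label == "True":
--             true_rows += 1
--         elif label == "False":
--             false_rows += 1
--         for key, d in counters.items():
--             v = row.get(key, "")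
--             d[v] = d.get(v, 0) + 1
--
--     output = [
--         {"category": "overall", "name": "total_rows", "value": str(total)},
--         {"category": "overall", "name": "true_rows", "value": str(true_rows)},
--         {"category": "overall", "name": "false_rows", "value": str(false_rows)},
--     ]
--     for name, counts in counters.items():
--         output += _cat_rows(name, counts)
--     return output + _stat_rows(stats)
-- ===== Notes on version B (the rewrite author's own statement) =====
-- stated objective: alternative
-- what changed: B replaces A's six separate scans over rows (len, two sum-generator passes, four Counter constructions) with one fused loop that simultaneously maintains the total, the True/False counters and the four per-category count dicts, then emits the same rows; the stats tail is factored into a helper.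
import Mathlib
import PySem

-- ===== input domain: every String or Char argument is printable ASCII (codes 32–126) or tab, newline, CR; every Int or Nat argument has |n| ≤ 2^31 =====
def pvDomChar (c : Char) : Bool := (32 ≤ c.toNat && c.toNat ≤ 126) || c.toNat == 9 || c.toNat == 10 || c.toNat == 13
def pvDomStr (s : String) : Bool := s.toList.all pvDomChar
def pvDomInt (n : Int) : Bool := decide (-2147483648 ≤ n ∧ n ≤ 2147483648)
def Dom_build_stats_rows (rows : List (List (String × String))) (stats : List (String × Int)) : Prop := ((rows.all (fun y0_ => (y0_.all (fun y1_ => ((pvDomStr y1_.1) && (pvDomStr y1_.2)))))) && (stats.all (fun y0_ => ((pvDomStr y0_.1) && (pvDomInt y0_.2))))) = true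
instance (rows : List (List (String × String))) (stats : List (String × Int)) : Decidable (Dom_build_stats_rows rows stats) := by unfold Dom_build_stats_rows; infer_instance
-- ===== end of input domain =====

-- B fuses A's six separate scans over rows into one loop maintaining all counters at once (objective: alternative decomposition, same cost).


-- ===== SHARED HELPERS (used by both ports: identical Python in A and B) =====
-- row.get(k) / row.get(k, "") on a Python dict given as an association list (dict construction: last duplicate wins)
def pvRowGet (row : List (String × String)) (k : String) : Option String :=
  (PySem.Dict.ofList row).get? k

def pvRowGetD (row : List (String × String)) (k : String) : String :=
  (PySem.Dict.ofList row).getD k ""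

-- key.partition(".") ported by hand (split at the FIRST '.'; exact): (before, found?, after)
def pvPartitionDot : List Char → List Char × Bool × List Char
  | [] => ([], false, [])
  | c :: t =>
    if c = '.' then ([], true, t)
    else
      let r := pvPartitionDot t
      (c :: r.1, r.2.1, r.2.2)

-- one output row of the final stats loop:  category, _, metric = key.partition("."); name = metric or key
def pvStatRow (p : String × Int) : List (String × String) :=
  let q := pvPartitionDot p.1.toList
  let metric := String.ofList q.2.2
  [("category", String.ofList q.1), ("name", if metric = "" then p.1 else metric), ("value", PySem.Int.toStr p.2)]

-- the whole final loop: for key, value in sorted(stats.items()): …  (stats, a Counter, arrives as the dict of the pairs)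
def pvStatsPart (stats : List (String × Int)) : List (List (String × String)) :=
  (PySem.List.sorted2 (PySem.Dict.ofList stats).items (fun p => p.1) (fun p => p.2)).map pvStatRow

-- the rows emitted for one counter: for name, value in sorted(values.items()): …
def pvCatRows (category : String) (d : PySem.Dict String Int) : List (List (String × String)) :=
  (PySem.List.sorted2 d.items (fun p => p.1) (fun p => p.2)).map
    (fun p => [("category", category), ("name", p.1), ("value", PySem.Int.toStr p.2)])

-- ===== PORT A =====
def build_stats_rows (rows : List (List (String × String))) (stats : List (String × Int)) : List (List (String × String)) :=
  let output : List (List (String × String)) :=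
    [[("category", "overall"), ("name", "total_rows"), ("value", PySem.Int.toStr rows.length)],
     [("category", "overall"), ("name", "true_rows"),
      ("value", PySem.Int.toStr (rows.foldl (fun a row => a + (if pvRowGet row "label" = some "True" then 1 else 0)) 0))],
     [("category", "overall"), ("name", "false_rows"),
      ("value", PySem.Int.toStr (rows.foldl (fun a row => a + (if pvRowGet row "label" = some "False" then 1 else 0)) 0))]]
  let output :=
    [("claim_family", PySem.Dict.counter (rows.map (fun row => pvRowGetD row "claim_family"))),
     ("claim_type", PySem.Dict.counter (rows.map (fun row => pvRowGetD row "claim_type"))),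
     ("rule_id", PySem.Dict.counter (rows.map (fun row => pvRowGetD row "rule_id"))),
     ("gold_resolution_method", PySem.Dict.counter (rows.map (fun row => pvRowGetD row "gold_resolution_method")))].foldl
      (fun acc cv => acc ++ pvCatRows cv.1 cv.2) output
  output ++ pvStatsPart stats

-- ===== PORT B =====
-- d[v] = d.get(v, 0) + 1
def pvBump (d : PySem.Dict String Int) (v : String) : PySem.Dict String Int :=
  d.insert v (d.getD v 0 + 1)

-- one iteration of B's fused loop over rows: state = (total, true_rows, false_rows, fam, typ, rid, met)
def pvBStep (s : Int × Int × Int × PySem.Dict String Int × PySem.Dict String Int × PySem.Dict String Int × PySem.Dict String Int)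
    (row : List (String × String)) :
    Int × Int × Int × PySem.Dict String Int × PySem.Dict String Int × PySem.Dict String Int × PySem.Dict String Int :=
  (s.1 + 1,
   (if pvRowGet row "label" = some "True" then s.2.1 + 1 else s.2.1),
   (if pvRowGet row "label" = some "True" then s.2.2.1
    else if pvRowGet row "label" = some "False" then s.2.2.1 + 1 else s.2.2.1),
   pvBump s.2.2.2.1 (pvRowGetD row "claim_family"),
   pvBump s.2.2.2.2.1 (pvRowGetD row "claim_type"),
   pvBump s.2.2.2.2.2.1 (pvRowGetD row "rule_id"),
   pvBump s.2.2.2.2.2.2 (pvRowGetD row "gold_resolution_method"))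

def build_stats_rows_alt (rows : List (List (String × String))) (stats : List (String × Int)) : List (List (String × String)) :=
  let s := rows.foldl pvBStep (0, 0, 0, PySem.Dict.empty, PySem.Dict.empty, PySem.Dict.empty, PySem.Dict.empty)
  [[("category", "overall"), ("name", "total_rows"), ("value", PySem.Int.toStr s.1)],
   [("category", "overall"), ("name", "true_rows"), ("value", PySem.Int.toStr s.2.1)],
   [("category", "overall"), ("name", "false_rows"), ("value", PySem.Int.toStr s.2.2.1)]]
    ++ pvCatRows "claim_family" s.2.2.2.1
    ++ pvCatRows "claim_type" s.2.2.2.2.1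
    ++ pvCatRows "rule_id" s.2.2.2.2.2.1
    ++ pvCatRows "gold_resolution_method" s.2.2.2.2.2.2
    ++ pvStatsPart stats

-- ===== PRECONDITION & SPEC =====
def Spec_build_stats_rows (rows : List (List (String × String))) (stats : List (String × Int)) (out : List (List (String × String))) : Prop := out = build_stats_rows_alt rows stats
instance (rows : List (List (String × String))) (stats : List (String × Int)) (out : List (List (String × String))) : Decidable (Spec_build_stats_rows rows stats out) := by unfold Spec_build_stats_rows; infer_instance

-- ===== CLAIM (what is proved, stated in full; the proofs are below) =====
def Claim_equal_build_stats_rows : Prop := ∀ (rows : List (List (String × String))) (stats : List (String × Int)), Dom_build_stats_rows rows stats → Spec_build_stats_rows rows stats (build_stats_rows rows stats)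

-- ===== LEMMAS AND PROOFS =====

-- B's fused fold, component by component, equals A's separate folds (from arbitrary accumulators).
lemma pvBfold (rows : List (List (String × String))) (n t f : Int)
    (d1 d2 d3 d4 : PySem.Dict String Int) :
    rows.foldl pvBStep (n, t, f, d1, d2, d3, d4) =
      (n + rows.length,
       rows.foldl (fun a row => a + (if pvRowGet row "label" = some "True" then 1 else 0)) t,
       rows.foldl (fun a row => a + (if pvRowGet row "label" = some "False" then 1 else 0)) f,
       rows.foldl (fun d row => pvBump d (pvRowGetD row "claim_family")) d1,
       rows.foldl (fun d row => pvBump d (pvRowGetD row "claim_type")) d2,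
       rows.foldl (fun d row => pvBump d (pvRowGetD row "rule_id")) d3,
       rows.foldl (fun d row => pvBump d (pvRowGetD row "gold_resolution_method")) d4) := by
  induction rows generalizing n t f d1 d2 d3 d4 with
  | nil => simp
  | cons r rs ih =>
    simp only [List.foldl_cons, pvBStep, ih, List.length_cons]
    refine congrArg₂ _ (by push_cast; ring) (congrArg₂ _ ?_ (congrArg₂ _ ?_ rfl))
    · by_cases h : pvRowGet r "label" = some "True" <;> simp [h]
    · by_cases h : pvRowGet r "label" = some "True"
      · simp [h]
      · by_cases h2 : pvRowGet r "label" = some "False" <;> simp [h, h2]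

-- B's dict-increment fold from the empty dict is Counter(map).
lemma pvBump_fold_eq_counter (rows : List (List (String × String))) (k : String) :
    rows.foldl (fun d row => pvBump d (pvRowGetD row k)) PySem.Dict.empty =
      PySem.Dict.counter (rows.map (fun row => pvRowGetD row k)) := by
  rw [← PySem.Dict.foldl_insert_getD_add_one_eq_counter, ← List.foldl_map]
  rfl

-- ===== VERDICT (by name: the statement is the Claim_ definition above) =====
theorem build_stats_rows_spec : Claim_equal_build_stats_rows := by
  intro rows stats _
  unfold Spec_build_stats_rows build_stats_rows build_stats_rows_alt
  simp only [List.foldl_cons, List.foldl_nil, pvBfold, pvBump_fold_eq_counter, zero_add,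
    List.append_assoc]
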